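-- pv_equiv track=rewrite | github.com/lishengbao/grimoirelab-elk-gitcode | grimoire_elk_gitcode/enriched/gitcode.py | get_event_type
-- ===== SOURCE A (Python) =====
-- def get_event_type(action_type, content):
--     if action_type is None:
--         return None
--
--     rules = [
--         (lambda: action_type == "label" and "add" in content, "LabeledEvent"),
--         (lambda: action_type == "label" and "delete" in content, "UnlabeledEvent"),
--         (lambda: action_type == "closed", "ClosedEvent"),
--         (lambda: action_type == "opened", "ReopenedEvent"),
--         (lambda: action_type == "milestone" and "changed" in content, "MilestonedEvent"),
--         (lambda: action_type == "milestone" and "removed" in content, "DemilestonedEvent"),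
--         (lambda: action_type == "locked", "LockedEvent"),
--         (lambda: action_type == "unlocked", "UnlockedEvent"),
--         (lambda: action_type == "title", "RenamedTitleEvent"),
--         (lambda: action_type == "merged", "MergedEvent"),
--         (lambda: action_type == "description", "ChangeDescriptionEvent"),
--         (lambda: action_type == "add_mr_issue_link", "LinkIssueEvent"),
--         (lambda: action_type == "delete_mr_issue_link", "UnlinkIssueEvent"),
--         (lambda: action_type == "add_issue_mr_link", "LinkPullRequestEvent"),
--         (lambda: action_type == "delete_issue_mr_link", "UnlinkPullRequestEvent"),
--         (lambda: action_type == "add_issue_branch_link", "SettingBranchEvent"),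
--         (lambda: action_type == "delete_issue_branch_link", "ChangeBranchEvent"),
--         (lambda: action_type == "discussion", "DiscussionEvent"),
--         (lambda: action_type == "confidential", "ConfidentialEvent"),
--         (lambda: (action_type == "assignee" and "assigned" in content) or (action_type == "mr_change" and ("Add assignees" in content or "Add approvers" in content)),"AssignedEvent"),
--         (lambda: (action_type == "assignee" and "unassigned" in content) or (action_type == "mr_change" and ("Delete assignees" in content or "Delete approvers" in content)),"UnassignedEvent"),
--         (lambda: action_type == "mr_change" and "Add testers" in content, "SetTesterEvent"),
--         (lambda: action_type == "mr_change" and "deleted testers" in content, "UnsetTesterEvent"),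
--         (lambda: action_type == "mr_change" and "Add reviewers" in content ,"SetReviewerEvent"),
--         (lambda: action_type == "mr_change" and "Delete reviewers" in content ,"UnsetReviewerEvent"),
--         (lambda: action_type == "mr_change" and "Approval Gate : pass" in content, "CheckPassEvent"),
--         (lambda: action_type == "mr_change" and "Test Gate : pass" in content, "TestPassEvent"),
--         (lambda: action_type == "mr_change" and "Review Gate : pass" in content, "ReviewPassEvent"),
--         (lambda: action_type == "mr_change" and "Approval Gate : reset" in content, "ResetAssignResultEvent"),
--         (lambda: action_type == "mr_change" and "Test Gate : reset" in content, "ResetTestResultEvent"),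
--         (lambda: action_type == "mr_change" and "Review Gate : reset" in content, "ResetReviewResultEvent"),
--         (lambda: action_type == "mr_change" and "Approval Gate : reject" in content, "CheckRejectEvent"),
--         (lambda: action_type == "mr_change" and "Test Gate : reject" in content, "TestRejectEvent"),
--         (lambda: action_type == "mr_change" and "Review Gate : reject" in content, "ReviewRejectEvent"),
--     ]
--
--     for condition, event_type in rules:
--         if condition():
--             return event_type
--     return None
-- ===== SOURCE B (Python) =====
-- # Dispatch-table reimplementation: one dict lookup replaces the 34-rule linear scan;
-- # content-dependent action types map to an ordered (substring, event) list.
--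
-- _DISPATCH = {
--     "label": [("add", "LabeledEvent"), ("delete", "UnlabeledEvent")],
--     "closed": "ClosedEvent",
--     "opened": "ReopenedEvent",
--     "milestone": [("changed", "MilestonedEvent"), ("removed", "DemilestonedEvent")],
--     "locked": "LockedEvent",
--     "unlocked": "UnlockedEvent",
--     "title": "RenamedTitleEvent",
--     "merged": "MergedEvent",
--     "description": "ChangeDescriptionEvent",
--     "add_mr_issue_link": "LinkIssueEvent",
--     "delete_mr_issue_link": "UnlinkIssueEvent",
--     "add_issue_mr_link": "LinkPullRequestEvent",
--     "delete_issue_mr_link": "UnlinkPullRequestEvent",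
--     "add_issue_branch_link": "SettingBranchEvent",
--     "delete_issue_branch_link": "ChangeBranchEvent",
--     "discussion": "DiscussionEvent",
--     "confidential": "ConfidentialEvent",
--     "assignee": [("assigned", "AssignedEvent"), ("unassigned", "UnassignedEvent")],
--     "mr_change": [
--         ("Add assignees", "AssignedEvent"),
--         ("Add approvers", "AssignedEvent"),
--         ("Delete assignees", "UnassignedEvent"),
--         ("Delete approvers", "UnassignedEvent"),
--         ("Add testers", "SetTesterEvent"),
--         ("deleted testers", "UnsetTesterEvent"),
--         ("Add reviewers", "SetReviewerEvent"),
--         ("Delete reviewers", "UnsetReviewerEvent"),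
--         ("Approval Gate : pass", "CheckPassEvent"),
--         ("Test Gate : pass", "TestPassEvent"),
--         ("Review Gate : pass", "ReviewPassEvent"),
--         ("Approval Gate : reset", "ResetAssignResultEvent"),
--         ("Test Gate : reset", "ResetTestResultEvent"),
--         ("Review Gate : reset", "ResetReviewResultEvent"),
--         ("Approval Gate : reject", "CheckRejectEvent"),
--         ("Test Gate : reject", "TestRejectEvent"),
--         ("Review Gate : reject", "ReviewRejectEvent"),
--     ],
-- }
--
--
-- def get_event_type(action_type, content):
--     if action_type is None:
--         return None
--     entry = _DISPATCH.get(action_type)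
--     if entry is None:
--         return None
--     if isinstance(entry, str):
--         return entry
--     for sub, event_type in entry:
--         if sub in content:
--             return event_type
--     return None
-- ===== Notes on version B (the rewrite author's own statement) =====
-- stated objective: idiomatic
-- what changed: Replaced the 34-lambda linear rule scan with a single dict dispatch keyed by action_type, mapping either directly to an event string or to an ordered (substring, event) list scanned in the original rule order.
import Mathlib
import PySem

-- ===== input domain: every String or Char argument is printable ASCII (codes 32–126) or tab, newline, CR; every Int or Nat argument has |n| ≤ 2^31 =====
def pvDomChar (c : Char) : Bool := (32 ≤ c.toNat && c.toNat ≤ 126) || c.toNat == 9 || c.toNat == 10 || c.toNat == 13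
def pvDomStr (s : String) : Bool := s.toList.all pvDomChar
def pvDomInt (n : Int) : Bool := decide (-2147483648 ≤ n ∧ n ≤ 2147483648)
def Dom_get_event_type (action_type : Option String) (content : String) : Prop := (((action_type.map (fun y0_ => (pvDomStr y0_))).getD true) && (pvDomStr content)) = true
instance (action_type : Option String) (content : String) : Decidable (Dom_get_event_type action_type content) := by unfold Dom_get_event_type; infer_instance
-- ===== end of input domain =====

-- B replaces A's 34-rule linear scan with a dict dispatch keyed by action_type (idiomatic).
-- Equivalence is about the return value; neither version has side effects.

-- ===== PORT A =====
-- the 'for condition, event_type in rules: if condition(): return event_type' loop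
def pyRuleLoop : List (Bool × String) → Option String
  | [] => none
  | (c, e) :: rest => if c then some e else pyRuleLoop rest

def get_event_type (action_type : Option String) (content : String) : Option String :=
  match action_type with
  | none => none
  | some at_ =>
    let rules : List (Bool × String) := [
      (at_ == "label" && PySem.Str.isIn "add" content, "LabeledEvent"),
      (at_ == "label" && PySem.Str.isIn "delete" content, "UnlabeledEvent"),
      (at_ == "closed", "ClosedEvent"),
      (at_ == "opened", "ReopenedEvent"),
      (at_ == "milestone" && PySem.Str.isIn "changed" content, "MilestonedEvent"),
      (at_ == "milestone" && PySem.Str.isIn "removed" content, "DemilestonedEvent"),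
      (at_ == "locked", "LockedEvent"),
      (at_ == "unlocked", "UnlockedEvent"),
      (at_ == "title", "RenamedTitleEvent"),
      (at_ == "merged", "MergedEvent"),
      (at_ == "description", "ChangeDescriptionEvent"),
      (at_ == "add_mr_issue_link", "LinkIssueEvent"),
      (at_ == "delete_mr_issue_link", "UnlinkIssueEvent"),
      (at_ == "add_issue_mr_link", "LinkPullRequestEvent"),
      (at_ == "delete_issue_mr_link", "UnlinkPullRequestEvent"),
      (at_ == "add_issue_branch_link", "SettingBranchEvent"),
      (at_ == "delete_issue_branch_link", "ChangeBranchEvent"),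
      (at_ == "discussion", "DiscussionEvent"),
      (at_ == "confidential", "ConfidentialEvent"),
      ((at_ == "assignee" && PySem.Str.isIn "assigned" content) || (at_ == "mr_change" && (PySem.Str.isIn "Add assignees" content || PySem.Str.isIn "Add approvers" content)), "AssignedEvent"),
      ((at_ == "assignee" && PySem.Str.isIn "unassigned" content) || (at_ == "mr_change" && (PySem.Str.isIn "Delete assignees" content || PySem.Str.isIn "Delete approvers" content)), "UnassignedEvent"),
      (at_ == "mr_change" && PySem.Str.isIn "Add testers" content, "SetTesterEvent"),
      (at_ == "mr_change" && PySem.Str.isIn "deleted testers" content, "UnsetTesterEvent"),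
      (at_ == "mr_change" && PySem.Str.isIn "Add reviewers" content, "SetReviewerEvent"),
      (at_ == "mr_change" && PySem.Str.isIn "Delete reviewers" content, "UnsetReviewerEvent"),
      (at_ == "mr_change" && PySem.Str.isIn "Approval Gate : pass" content, "CheckPassEvent"),
      (at_ == "mr_change" && PySem.Str.isIn "Test Gate : pass" content, "TestPassEvent"),
      (at_ == "mr_change" && PySem.Str.isIn "Review Gate : pass" content, "ReviewPassEvent"),
      (at_ == "mr_change" && PySem.Str.isIn "Approval Gate : reset" content, "ResetAssignResultEvent"),
      (at_ == "mr_change" && PySem.Str.isIn "Test Gate : reset" content, "ResetTestResultEvent"),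
      (at_ == "mr_change" && PySem.Str.isIn "Review Gate : reset" content, "ResetReviewResultEvent"),
      (at_ == "mr_change" && PySem.Str.isIn "Approval Gate : reject" content, "CheckRejectEvent"),
      (at_ == "mr_change" && PySem.Str.isIn "Test Gate : reject" content, "TestRejectEvent"),
      (at_ == "mr_change" && PySem.Str.isIn "Review Gate : reject" content, "ReviewRejectEvent")]
    pyRuleLoop rules

-- ===== PORT B =====
-- _DISPATCH: value is either a direct event string (.inl) or an ordered (substring, event) list (.inr)
def pvDispatch : PySem.Dict String (Sum String (List (String × String))) := PySem.Dict.mk [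
  ("label", .inr [("add", "LabeledEvent"), ("delete", "UnlabeledEvent")]),
  ("closed", .inl "ClosedEvent"),
  ("opened", .inl "ReopenedEvent"),
  ("milestone", .inr [("changed", "MilestonedEvent"), ("removed", "DemilestonedEvent")]),
  ("locked", .inl "LockedEvent"),
  ("unlocked", .inl "UnlockedEvent"),
  ("title", .inl "RenamedTitleEvent"),
  ("merged", .inl "MergedEvent"),
  ("description", .inl "ChangeDescriptionEvent"),
  ("add_mr_issue_link", .inl "LinkIssueEvent"),
  ("delete_mr_issue_link", .inl "UnlinkIssueEvent"),
  ("add_issue_mr_link", .inl "LinkPullRequestEvent"),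
  ("delete_issue_mr_link", .inl "UnlinkPullRequestEvent"),
  ("add_issue_branch_link", .inl "SettingBranchEvent"),
  ("delete_issue_branch_link", .inl "ChangeBranchEvent"),
  ("discussion", .inl "DiscussionEvent"),
  ("confidential", .inl "ConfidentialEvent"),
  ("assignee", .inr [("assigned", "AssignedEvent"), ("unassigned", "UnassignedEvent")]),
  ("mr_change", .inr [
    ("Add assignees", "AssignedEvent"),
    ("Add approvers", "AssignedEvent"),
    ("Delete assignees", "UnassignedEvent"),
    ("Delete approvers", "UnassignedEvent"),
    ("Add testers", "SetTesterEvent"),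
    ("deleted testers", "UnsetTesterEvent"),
    ("Add reviewers", "SetReviewerEvent"),
    ("Delete reviewers", "UnsetReviewerEvent"),
    ("Approval Gate : pass", "CheckPassEvent"),
    ("Test Gate : pass", "TestPassEvent"),
    ("Review Gate : pass", "ReviewPassEvent"),
    ("Approval Gate : reset", "ResetAssignResultEvent"),
    ("Test Gate : reset", "ResetTestResultEvent"),
    ("Review Gate : reset", "ResetReviewResultEvent"),
    ("Approval Gate : reject", "CheckRejectEvent"),
    ("Test Gate : reject", "TestRejectEvent"),
    ("Review Gate : reject", "ReviewRejectEvent")])]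

-- 'for sub, event_type in entry: if sub in content: return event_type'
def pySubLoop (content : String) : List (String × String) → Option String
  | [] => none
  | (sub, e) :: rest => if PySem.Str.isIn sub content then some e else pySubLoop content rest

def get_event_type_alt (action_type : Option String) (content : String) : Option String :=
  match action_type with
  | none => none
  | some at_ =>
    match PySem.Dict.get? pvDispatch at_ with
    | none => none
    | some (.inl e) => some e
    | some (.inr subs) => pySubLoop content subs

-- ===== PRECONDITION & SPEC =====
def Spec_get_event_type (action_type : Option String) (content : String) (out : Option String) : Prop := out = get_event_type_alt action_type content
instance (action_type : Option String) (content : String) (out : Option String) : Decidable (Spec_get_event_type action_type content out) := by unfold Spec_get_event_type; infer_instance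

-- ===== CLAIM (what is proved, stated in full; the proofs are below) =====
def Claim_equal_get_event_type : Prop := ∀ (action_type : Option String) (content : String), Dom_get_event_type action_type content → Spec_get_event_type action_type content (get_event_type action_type content)

-- ===== LEMMAS AND PROOFS =====

-- ===== VERDICT (by name: the statement is the Claim_ definition above) =====
theorem get_event_type_spec : Claim_equal_get_event_type := by
  intro at_ content _
  unfold Spec_get_event_type
  cases at_ with
  | none => rfl
  | some s =>
    by_cases h1 : s = "label"
    · subst h1; rfl
    by_cases h2 : s = "closed"
    · subst h2; rfl
    by_cases h3 : s = "opened"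
    · subst h3; rfl
    by_cases h4 : s = "milestone"
    · subst h4; rfl
    by_cases h5 : s = "locked"
    · subst h5; rfl
    by_cases h6 : s = "unlocked"
    · subst h6; rfl
    by_cases h7 : s = "title"
    · subst h7; rfl
    by_cases h8 : s = "merged"
    · subst h8; rfl
    by_cases h9 : s = "description"
    · subst h9; rfl
    by_cases h10 : s = "add_mr_issue_link"
    · subst h10; rfl
    by_cases h11 : s = "delete_mr_issue_link"
    · subst h11; rfl
    by_cases h12 : s = "add_issue_mr_link"
    · subst h12; rfl
    by_cases h13 : s = "delete_issue_mr_link"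
    · subst h13; rfl
    by_cases h14 : s = "add_issue_branch_link"
    · subst h14; rfl
    by_cases h15 : s = "delete_issue_branch_link"
    · subst h15; rfl
    by_cases h16 : s = "discussion"
    · subst h16; rfl
    by_cases h17 : s = "confidential"
    · subst h17; rfl
    by_cases h18 : s = "assignee"
    · subst h18
      simp [get_event_type, get_event_type_alt, pyRuleLoop, pySubLoop, pvDispatch, PySem.Dict.get?]
    by_cases h19 : s = "mr_change"
    · subst h19
      cases ha1 : PySem.Str.isIn "Add assignees" content <;>
      cases ha2 : PySem.Str.isIn "Add approvers" content <;>
      cases hd1 : PySem.Str.isIn "Delete assignees" content <;>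
      cases hd2 : PySem.Str.isIn "Delete approvers" content <;>
      ( simp at ha1 ha2 hd1 hd2
        simp [get_event_type, get_event_type_alt, pyRuleLoop, pySubLoop, pvDispatch, PySem.Dict.get?, ha1, ha2, hd1, hd2])
    · simp [get_event_type, get_event_type_alt, pyRuleLoop, pvDispatch, PySem.Dict.get?,
        h1, h2, h3, h4, h5, h6, h7, h8, h9, h10, h11, h12, h13, h14, h15, h16, h17, h18, h19,
        Ne.symm h1, Ne.symm h2, Ne.symm h3, Ne.symm h4, Ne.symm h5, Ne.symm h6, Ne.symm h7,
        Ne.symm h8, Ne.symm h9, Ne.symm h10, Ne.symm h11, Ne.symm h12, Ne.symm h13, Ne.symm h14,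
        Ne.symm h15, Ne.symm h16, Ne.symm h17, Ne.symm h18, Ne.symm h19]
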